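-- pv_equiv track=rewrite | github.com/IDK04/Advent_of_code | Day 1/1.py | max_calories
-- ===== SOURCE A (Python) =====
-- def max_calories(food):
--     max_food = max(map(sum, food))
--     food_len = len(food)-1
--     while food_len >= 0:
--         if max_food == sum(food[food_len]):
--             food.pop(food_len)
--             return (max_food, food)
--         food_len -= 1
-- ===== SOURCE B (Python) =====
-- def max_calories(food):
--     best = None
--     idx = 0
--     for i, x in enumerate(food):
--         s = sum(x)
--         if best is None or s >= best:
--             best, idx = s, i
--     del food[idx]
--     return (best, food)
-- ===== Notes on version B (the rewrite author's own statement) =====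
-- stated objective: alternative
-- what changed: B is one fused forward pass that tracks the running maximum sum and its latest index with a >= update (so ties keep the last index), then deletes that single index; A first computes max(map(sum, food)) and then runs a second backward while-loop recomputing each sublist's sum until it re-finds the maximum.
import Mathlib
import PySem

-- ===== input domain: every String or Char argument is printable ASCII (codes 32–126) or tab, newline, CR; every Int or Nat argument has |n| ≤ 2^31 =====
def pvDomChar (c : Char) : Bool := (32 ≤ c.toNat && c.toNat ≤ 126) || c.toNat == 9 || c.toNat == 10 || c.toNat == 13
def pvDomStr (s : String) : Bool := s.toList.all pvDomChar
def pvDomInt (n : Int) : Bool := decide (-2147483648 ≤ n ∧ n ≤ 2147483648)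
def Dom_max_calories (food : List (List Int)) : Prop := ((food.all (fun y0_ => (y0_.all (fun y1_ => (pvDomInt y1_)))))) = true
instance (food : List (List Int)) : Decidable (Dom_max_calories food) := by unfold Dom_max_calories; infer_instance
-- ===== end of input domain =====

-- B replaces A's two stages (a max pass over the sums, then a backward while-loop recomputing
-- sums until the max reappears) with ONE forward pass tracking the running maximum and its
-- latest index (>= update keeps the last tie), then deleting that index (objective: alternative).
-- Both Pythons mutate `food` in place identically; the mutated list is the returned one, so the
-- return-value equivalence proved here covers the mutation as well.

-- ===== PORT A =====
-- A's while-loop, counting food_len down from len(food)-1; the argument is the current index.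
-- Falling off the loop (Python implicitly returns None) is unreachable because max_food is
-- attained; that branch carries the dummy (0, []).
def maxA_loop (maxFood : Int) (food : List (List Int)) : Nat → Int × List (List Int)
  | 0 =>
    if maxFood = ((PySem.List.pyGet? food 0).getD []).sum then
      match PySem.List.pop? food ((0 : Nat) : Int) with
      | some (_, rest) => (maxFood, rest)
      | none => (0, [])
    else (0, [])
  | i + 1 =>
    if maxFood = ((PySem.List.pyGet? food ((i + 1 : Nat) : Int)).getD []).sum then
      match PySem.List.pop? food ((i + 1 : Nat) : Int) with
      | some (_, rest) => (maxFood, rest)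
      | none => (0, [])
    else maxA_loop maxFood food i

def max_calories (food : List (List Int)) : Int × List (List Int) :=
  match PySem.List.max? (food.map List.sum) (fun x => x) with
  | none => (0, [])  -- Python: max() raises ValueError on empty food (excluded by Pre_)
  | some m => maxA_loop m food (food.length - 1)

-- ===== PORT B =====
-- B's single forward for-loop over enumerate(food); the state is (best : Option Int, idx : Int).
def maxB_step (acc : Option Int × Int) (p : Int × List Int) : Option Int × Int :=
  let s := p.2.sum
  match acc.1 with
  | none => (some s, p.1)
  | some b => if b ≤ s then (some s, p.1) else acc

def max_calories_alt (food : List (List Int)) : Int × List (List Int) :=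
  let st := (PySem.List.enumerate food 0).foldl maxB_step (none, 0)
  match st.1, PySem.List.pop? food st.2 with
  | some b, some (_, rest) => (b, rest)
  | _, _ => (0, [])  -- Python: `del food[idx]` raises IndexError on empty food (excluded by Pre_)

-- ===== PRECONDITION & SPEC =====
-- Pre_ excludes only the empty list, on which both Pythons raise
-- (ValueError from max() in A, IndexError from del in B).
def Pre_max_calories (food : List (List Int)) : Prop := food ≠ []
instance (food : List (List Int)) : Decidable (Pre_max_calories food) := by
  unfold Pre_max_calories; infer_instance
def pvWitness_max_calories : List (List Int) := [[1, 2], [3]]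
def Spec_max_calories (food : List (List Int)) (out : Int × List (List Int)) : Prop := out = max_calories_alt food
instance (food : List (List Int)) (out : Int × List (List Int)) : Decidable (Spec_max_calories food out) := by unfold Spec_max_calories; infer_instance

-- ===== CLAIM (what is proved, stated in full; the proofs are below) =====
def Claim_equal_max_calories : Prop := ∀ (food : List (List Int)), Dom_max_calories food → Pre_max_calories food → Spec_max_calories food (max_calories food)

-- ===== LEMMAS AND PROOFS =====

-- A's loop, started at index i, pops at position `idx` when sums[idx] = m, idx ≤ i, and no
-- index in (idx, i] carries the value m.
theorem maxA_loop_eq (food : List (List Int)) (m : Int) (idx : Nat)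
    (hlt : idx < food.length)
    (hm : (food.map List.sum)[idx]'(by simpa using hlt) = m) :
    ∀ i, idx ≤ i → (hi : i < food.length) →
    (∀ t (ht : t < food.length), idx < t → t ≤ i → (food.map List.sum)[t]'(by simpa using ht) ≠ m) →
    maxA_loop m food i = (m, food.eraseIdx idx) := by
  intro i
  induction i with
  | zero =>
    intro h0 hi _
    have hidx0 : idx = 0 := Nat.le_zero.mp h0
    subst hidx0
    have hget : PySem.List.pyGet? food (0 : Int) = some (food[0]'hlt) := by
      simpa using PySem.List.pyGet?_ofNat (xs := food) (n := 0) hlt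
    have hpop := PySem.List.pop?_natCast (xs := food) (n := 0) hlt
    simp only [Nat.cast_zero] at hpop
    simp only [maxA_loop, Nat.cast_zero, hget, Option.getD_some]
    have hsum : List.sum (food[0]'hlt) = m := by simpa using hm
    rw [if_pos hsum.symm, hpop]
  | succ i ih =>
    intro hle hi hno
    by_cases hidx : idx = i + 1
    · subst hidx
      have hget : PySem.List.pyGet? food ((i + 1 : Nat) : Int) = some (food[i+1]'hlt) :=
        PySem.List.pyGet?_ofNat (xs := food) (n := i + 1) hlt
      have hpop := PySem.List.pop?_natCast (xs := food) (n := i + 1) hlt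
      have hsum : List.sum (food[i+1]'hlt) = m := by simpa using hm
      simp only [maxA_loop, hget, Option.getD_some]
      rw [if_pos hsum.symm, hpop]
    · have hle' : idx ≤ i := by omega
      have hne := hno (i + 1) hi (by omega) (le_refl _)
      have hget : PySem.List.pyGet? food ((i + 1 : Nat) : Int) = some (food[i+1]'hi) :=
        PySem.List.pyGet?_ofNat (xs := food) (n := i + 1) hi
      have hsumne : m ≠ List.sum (food[i+1]'hi) := by
        intro h; exact hne (by simpa using h.symm)
      simp only [maxA_loop, hget, Option.getD_some]
      rw [if_neg hsumne]
      exact ih hle' (by omega) (fun t ht h1 h2 => hno t ht h1 (by omega))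

-- B's fold computes the maximum of the sums together with its LAST index.
theorem maxB_fold_spec (food : List (List Int)) (hne : food ≠ []) :
    ∃ (m : Int) (idx : Nat),
      (PySem.List.enumerate food 0).foldl maxB_step (none, 0) = (some m, (idx : Int)) ∧
      ∃ (hlt : idx < food.length),
        (food.map List.sum)[idx]'(by simpa using hlt) = m ∧
        (∀ t (ht : t < food.length), (food.map List.sum)[t]'(by simpa using ht) ≤ m) ∧
        (∀ t (ht : t < food.length), idx < t → (food.map List.sum)[t]'(by simpa using ht) ≠ m) := by
  induction food using List.reverseRecOn with
  | nil => exact absurd rfl hne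
  | append_singleton xs y ih =>
    rw [PySem.List.enumerate_append, List.foldl_append]
    by_cases hxs : xs = []
    · subst hxs
      refine ⟨y.sum, 0, ?_, by simp, by simp, ?_, ?_⟩
      · simp [PySem.List.enumerate, maxB_step]
      · intro t ht
        have ht0 : t = 0 := by simp at ht; omega
        subst ht0; simp
      · intro t ht h
        have : t = 0 := by simp at ht; omega
        omega
    · obtain ⟨m, idx, hfold, hlt, hval, hle, hlast⟩ := ih hxs
      rw [hfold]
      have hs : (PySem.List.enumerate [y] (0 + (xs.length : Int))).foldl maxB_step
          (some m, (idx : Int)) = maxB_step (some m, (idx : Int)) ((xs.length : Int), y) := by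
        simp [PySem.List.enumerate]
      rw [hs]
      have hget_old : ∀ t (ht : t < xs.length),
          ((xs ++ [y]).map List.sum)[t]'(by simp; omega) =
          (xs.map List.sum)[t]'(by simpa using ht) := by
        intro t ht
        simp only [List.map_append, List.map_cons, List.map_nil]
        exact List.getElem_append_left (by simpa using ht)
      have hget_last : ((xs ++ [y]).map List.sum)[xs.length]'(by simp) = y.sum := by
        simp only [List.map_append, List.map_cons, List.map_nil]
        have hlen : (List.map List.sum xs).length = xs.length := by simp
        simp [List.getElem_append_right, hlen]
      by_cases hcmp : m ≤ y.sum
      · refine ⟨y.sum, xs.length, ?_, by simp, hget_last, ?_, ?_⟩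
        · simp [maxB_step, hcmp]
        · intro t ht
          rcases Nat.lt_succ_iff_lt_or_eq.mp (by simpa using ht) with h | h
          · rw [hget_old t h]; exact le_trans (hle t h) hcmp
          · subst h; rw [hget_last]
        · intro t ht h1
          have : t < xs.length + 1 := by simpa using ht
          omega
      · have hcmp' : y.sum < m := lt_of_not_ge hcmp
        refine ⟨m, idx, ?_, by simp; omega, ?_, ?_, ?_⟩
        · simp [maxB_step, hcmp]
        · rw [hget_old idx hlt]; exact hval
        · intro t ht
          rcases Nat.lt_succ_iff_lt_or_eq.mp (by simpa using ht) with h | h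
          · rw [hget_old t h]; exact hle t h
          · subst h; rw [hget_last]; exact le_of_lt hcmp'
        · intro t ht h1
          rcases Nat.lt_succ_iff_lt_or_eq.mp (by simpa using ht) with h | h
          · rw [hget_old t h]; exact hlast t h h1
          · subst h; rw [hget_last]; exact ne_of_lt hcmp'

-- ===== VERDICT (by name: the statement is the Claim_ definition above) =====
theorem max_calories_spec : Claim_equal_max_calories := by
  intro food _ hpre
  unfold Spec_max_calories max_calories max_calories_alt
  obtain ⟨m, idx, hfold, hlt, hval, hle, hlast⟩ := maxB_fold_spec food hpre
  -- A's max? returns the same value m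
  have hsne : food.map List.sum ≠ [] := by
    simp only [ne_eq, List.map_eq_nil_iff]; exact hpre
  obtain ⟨m', hmax⟩ : ∃ m', PySem.List.max? (food.map List.sum) (fun x => x) = some m' := by
    cases h : PySem.List.max? (food.map List.sum) (fun x => x) with
    | none => exact absurd ((PySem.List.max?_eq_none_iff _ _).mp h) hsne
    | some m' => exact ⟨m', rfl⟩
  have hmem' : m' ∈ food.map List.sum := PySem.List.max?_mem hmax
  have hmm' : m' = m := by
    have h1 : m' ≤ m := by
      obtain ⟨t, ht, hv⟩ := List.getElem_of_mem hmem'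
      rw [← hv]; exact hle t (by simpa using ht)
    have h2 : m ≤ m' := by
      have := PySem.List.max?_isMax hmax ((food.map List.sum)[idx]'(by simpa using hlt))
        (List.getElem_mem _)
      simpa [hval] using this
    omega
  have hloop := maxA_loop_eq food m idx hlt hval (food.length - 1)
      (by omega) (by have := List.length_pos_iff.mpr hpre; omega)
      (fun t ht h1 _ => hlast t ht h1)
  have hpop := PySem.List.pop?_natCast (xs := food) (n := idx) hlt
  simp only [hmax, hmm', hfold, hloop, hpop]
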